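-- pv_equiv track=rewrite | github.com/ionero12/Python_FII | Teme/lab2.py | find_obstructed_seats
-- ===== SOURCE A (Python) =====
-- from typing import List, Tuple, Any, Set
--
-- def find_obstructed_seats(matrix: List[List[int]]) -> set[tuple[int, int]]:
--     obstructed_seats = set()
--     rows = len(matrix)
--     cols = len(matrix[0])
--     for i in range(rows):
--         for j in range(cols):
--             current_height = matrix[i][j]
--             for k in range(i + 1, rows):
--                 if matrix[k][j] <= current_height:
--                     obstructed_seats.add((k, j))
--     return obstructed_seats
-- ===== SOURCE B (Python) =====
-- def find_obstructed_seats(matrix):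
--     rows = len(matrix)
--     cols = len(matrix[0])
--     result = []
--     pm = list(matrix[0][:cols])  # running column maxima over rows seen so far
--     for j in range(cols):
--         for k in range(1, rows):
--             if matrix[k][j] <= pm[j]:
--                 result.append((k, j))
--     for i in range(1, rows):
--         for j in range(cols):
--             h = matrix[i][j]
--             if h > pm[j]:
--                 # row i sets a new column record: it is the first blocker of every
--                 # lower seat whose height lies in (old max, h]
--                 for k in range(i + 1, rows):
--                     v = matrix[k][j]
--                     if v <= h and v > pm[j]:
--                         result.append((k, j))
--                 pm[j] = h
--     return set(result)
-- ===== Notes on version B (the rewrite author's own statement) =====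
-- stated objective: faster
-- what changed: B keeps a per-column running maximum and scans below a row only when that row sets a new column record, emitting each obstructed seat exactly once (at its first blocker) into a plain list, instead of A's unconditional scan below every seat with set-deduplication.
import Mathlib
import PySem

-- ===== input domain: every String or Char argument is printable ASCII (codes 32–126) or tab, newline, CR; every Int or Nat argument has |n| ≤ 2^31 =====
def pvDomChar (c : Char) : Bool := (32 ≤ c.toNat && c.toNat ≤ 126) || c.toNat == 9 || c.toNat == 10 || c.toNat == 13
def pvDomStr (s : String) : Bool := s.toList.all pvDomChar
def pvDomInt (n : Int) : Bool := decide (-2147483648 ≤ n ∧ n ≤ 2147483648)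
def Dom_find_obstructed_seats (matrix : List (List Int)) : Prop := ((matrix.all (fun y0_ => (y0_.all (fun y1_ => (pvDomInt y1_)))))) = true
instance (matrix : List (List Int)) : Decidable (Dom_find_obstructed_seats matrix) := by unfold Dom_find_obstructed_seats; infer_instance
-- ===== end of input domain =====

-- B replaces A's "for every seat, rescan the whole column below it" (deduplicated by a set) with a
-- per-column running maximum: only a row that sets a new column record scans below it, and each
-- obstructed seat is appended exactly once, by its first blocking row.

-- ===== PORT A =====
def find_obstructed_seats (matrix : List (List Int)) : List (Int × Int) :=
  let rows : Int := (matrix.length : Int)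
  let cols : Int := ((PySem.List.pyGetD matrix 0 []).length : Int)
  (PySem.List.pyRange 0 rows).foldl (fun obstructed i =>
    (PySem.List.pyRange 0 cols).foldl (fun obstructed j =>
      let current_height := PySem.List.pyGetD (PySem.List.pyGetD matrix i []) j 0
      (PySem.List.pyRange (i + 1) rows).foldl (fun obstructed k =>
        if PySem.List.pyGetD (PySem.List.pyGetD matrix k []) j 0 ≤ current_height
        then PySem.Set.add obstructed (k, j) else obstructed) obstructed) obstructed)
    PySem.Set.empty

def find_obstructed_seats_alt (matrix : List (List Int)) : List (Int × Int) :=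
  let rows : Int := (matrix.length : Int)
  let cols : Int := ((PySem.List.pyGetD matrix 0 []).length : Int)
  let pm0 : List Int := PySem.List.slice (PySem.List.pyGetD matrix 0 []) none (some cols)
  let result0 : List (Int × Int) :=
    (PySem.List.pyRange 0 cols).foldl (fun result j =>
      (PySem.List.pyRange 1 rows).foldl (fun result k =>
        if PySem.List.pyGetD (PySem.List.pyGetD matrix k []) j 0 ≤ PySem.List.pyGetD pm0 j 0
        then result ++ [(k, j)] else result) result) []
  let final :=
    (PySem.List.pyRange 1 rows).foldl (fun st i =>
      (PySem.List.pyRange 0 cols).foldl (fun st j =>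
        let h := PySem.List.pyGetD (PySem.List.pyGetD matrix i []) j 0
        if PySem.List.pyGetD st.2 j 0 < h then
          ((PySem.List.pyRange (i + 1) rows).foldl (fun res k =>
              let v := PySem.List.pyGetD (PySem.List.pyGetD matrix k []) j 0
              if v ≤ h ∧ PySem.List.pyGetD st.2 j 0 < v then res ++ [(k, j)] else res) st.1,
           PySem.List.pySetD st.2 j h)
        else st) st) (result0, pm0)
  PySem.Set.ofList final.1

-- ===== PRECONDITION & SPEC =====
-- Pre_ excludes exactly the inputs on which the Python A raises IndexError: the empty matrix
-- (matrix[0]) and matrices where some row is shorter than the first row (matrix[k][j]).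
def Pre_find_obstructed_seats (matrix : List (List Int)) : Prop :=
  matrix ≠ [] ∧ ∀ row ∈ matrix, (matrix.getD 0 []).length ≤ row.length
instance (matrix : List (List Int)) : Decidable (Pre_find_obstructed_seats matrix) := by
  unfold Pre_find_obstructed_seats; infer_instance

def pvWitness_find_obstructed_seats : List (List Int) := [[1, 3], [5, 2], [2, 0]]

def Spec_find_obstructed_seats (matrix : List (List Int)) (out : List (Int × Int)) : Prop := out = find_obstructed_seats_alt matrix
instance (matrix : List (List Int)) (out : List (Int × Int)) : Decidable (Spec_find_obstructed_seats matrix out) := by unfold Spec_find_obstructed_seats; infer_instance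

-- ===== CLAIM (what is proved, stated in full; the proofs are below) =====
def Claim_equal_find_obstructed_seats : Prop := ∀ (matrix : List (List Int)), Dom_find_obstructed_seats matrix → Pre_find_obstructed_seats matrix → Spec_find_obstructed_seats matrix (find_obstructed_seats matrix)

-- ===== LEMMAS AND PROOFS =====
-- Nat-indexed reference forms of both ports, an invariant tying A's set to B's list and
-- per-column running maxima, and column/row induction lemmas.

def pvM (matrix : List (List Int)) (i j : Nat) : Int := (matrix.getD i []).getD j 0
def pvKs (R i : Nat) : List Nat := (List.range (R - (i + 1))).map (fun t => i + 1 + t)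
def pvCM (matrix : List (List Int)) (i j : Nat) : Int :=
  (List.range i).foldl (fun a t => max a (pvM matrix t j)) (pvM matrix 0 j)
def pvColA (matrix : List (List Int)) (R i j : Nat) (s : List (Int × Int)) : List (Int × Int) :=
  (pvKs R i).foldl (fun s k =>
    if pvM matrix k j ≤ pvM matrix i j then PySem.Set.add s ((k : Int), (j : Int)) else s) s
def pvScanB (matrix : List (List Int)) (R i j : Nat) (p : Int) (res : List (Int × Int)) : List (Int × Int) :=
  (pvKs R i).foldl (fun res k =>
    if pvM matrix k j ≤ pvM matrix i j ∧ p < pvM matrix k j then res ++ [((k : Int), (j : Int))] else res) res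
def pvPm0 (matrix : List (List Int)) (C : Nat) : List Int := (matrix.getD 0 []).take C
def pvRowA (matrix : List (List Int)) (R C i : Nat) (s : List (Int × Int)) : List (Int × Int) :=
  (List.range C).foldl (fun s j => pvColA matrix R i j s) s
def pvRes0 (matrix : List (List Int)) (R C : Nat) : List (Int × Int) :=
  (List.range C).foldl (fun res j =>
    (pvKs R 0).foldl (fun res k =>
      if pvM matrix k j ≤ (pvPm0 matrix C).getD j 0 then res ++ [((k : Int), (j : Int))] else res) res) []
def pvRowB (matrix : List (List Int)) (R C i : Nat) (st : List (Int × Int) × List Int) :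
    List (Int × Int) × List Int :=
  (List.range C).foldl (fun st j =>
    if st.2.getD j 0 < pvM matrix i j then
      (pvScanB matrix R i j (st.2.getD j 0) st.1, st.2.set j (pvM matrix i j))
    else st) st
def pvA (matrix : List (List Int)) : List (Int × Int) :=
  (List.range matrix.length).foldl
    (fun s i => pvRowA matrix matrix.length (matrix.getD 0 []).length i s) []
def pvB (matrix : List (List Int)) : List (Int × Int) × List Int :=
  (List.range (matrix.length - 1)).foldl
    (fun st t => pvRowB matrix matrix.length (matrix.getD 0 []).length (t + 1) st)
    (pvRes0 matrix matrix.length (matrix.getD 0 []).length,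
     pvPm0 matrix (matrix.getD 0 []).length)

def pvMem (matrix : List (List Int)) (R C i c : Nat) (x : Int × Int) : Prop :=
  ∃ k j, k < R ∧ j < C ∧ 0 < k ∧ x = ((k : Int), (j : Int)) ∧
    ∃ t, t < (if j < c then i + 1 else i) ∧ t < k ∧ pvM matrix k j ≤ pvM matrix t j
def pvInvC (matrix : List (List Int)) (R C i c : Nat)
    (s : List (Int × Int)) (pm : List Int) : Prop :=
  pm.length = C ∧
  (∀ j, j < C → pm.getD j 0 = pvCM matrix (if j < c then i + 1 else i) j) ∧
  (∀ x, x ∈ s ↔ pvMem matrix R C i c x)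

def pvMem0 (matrix : List (List Int)) (R c : Nat) (x : Int × Int) : Prop :=
  ∃ k j, k < R ∧ j < c ∧ 0 < k ∧ x = ((k : Int), (j : Int)) ∧ pvM matrix k j ≤ pvM matrix 0 j

theorem mem_pvKs {R i k : Nat} : k ∈ pvKs R i ↔ i < k ∧ k < R := by
  simp only [pvKs, List.mem_map, List.mem_range]
  constructor
  · rintro ⟨t, ht, rfl⟩; omega
  · rintro ⟨h1, h2⟩; exact ⟨k - (i + 1), by omega, by omega⟩

theorem nodup_pvKs (R i : Nat) : (pvKs R i).Nodup := by
  refine List.Nodup.map (fun a b h => ?_) (List.nodup_range)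
  simpa using h

theorem pvCM_succ (matrix : List (List Int)) (i j : Nat) :
    pvCM matrix (i + 1) j = max (pvCM matrix i j) (pvM matrix i j) := by
  simp [pvCM, List.range_succ]

theorem pvCM_one (matrix : List (List Int)) (j : Nat) : pvCM matrix 1 j = pvM matrix 0 j := by
  simp [pvCM, List.range_succ]

theorem le_pvCM_iff (matrix : List (List Int)) (j : Nat) (v : Int) :
    ∀ i, 1 ≤ i → ((∃ t, t < i ∧ v ≤ pvM matrix t j) ↔ v ≤ pvCM matrix i j) := by
  intro i
  induction i with
  | zero => omega
  | succ n ih =>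
    intro _
    by_cases hn : n = 0
    · subst hn
      rw [pvCM_one]
      constructor
      · rintro ⟨t, ht, hv⟩; interval_cases t; exact hv
      · intro hv; exact ⟨0, by omega, hv⟩
    · rw [pvCM_succ, le_max_iff, ← ih (by omega)]
      constructor
      · rintro ⟨t, ht, hv⟩
        rcases Nat.lt_succ_iff_lt_or_eq.mp ht with ht' | rfl
        · exact Or.inl ⟨t, ht', hv⟩
        · exact Or.inr hv
      · rintro (⟨t, ht, hv⟩ | hv)
        · exact ⟨t, by omega, hv⟩
        · exact ⟨n, by omega, hv⟩

theorem foldl_append_ite {α β : Type} (P : α → Prop) [DecidablePred P] (f : α → β)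
    (l : List α) (acc : List β) :
    l.foldl (fun acc x => if P x then acc ++ [f x] else acc) acc
      = acc ++ (l.filter (fun x => decide (P x))).map f := by
  rw [← PySem.List.foldl_append_if (fun x => decide (P x)) f l acc]
  exact PySem.List.foldl_congr_mem _ _ _ _ (fun acc x _ => by simp)

theorem scanA (matrix : List (List Int)) (j : Nat) (h : Int)
    (Q : Nat → Prop) [DecidablePred Q] :
    ∀ (ks : List Nat) (s : List (Int × Int)), ks.Nodup →
    (∀ k ∈ ks, (((k : Int), (j : Int)) ∈ s ↔ Q k)) →
    ks.foldl (fun s k =>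
        if pvM matrix k j ≤ h then PySem.Set.add s ((k : Int), (j : Int)) else s) s
      = s ++ (ks.filter (fun k => decide (pvM matrix k j ≤ h) && !(decide (Q k)))).map
          (fun (k : Nat) => ((k : Int), (j : Int))) := by
  intro ks
  induction ks with
  | nil => intro s _ _; simp
  | cons k0 ks ih =>
    intro s hnd hmem
    have hk0 := hmem k0 (List.mem_cons_self)
    simp only [List.foldl_cons]
    by_cases hvh : pvM matrix k0 j ≤ h
    · by_cases hq : Q k0
      · rw [if_pos hvh, PySem.Set.add_of_mem (hk0.mpr hq)]
        have hf : (fun k => decide (pvM matrix k j ≤ h) && !(decide (Q k))) k0 = false := by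
          simp [hq]
        rw [List.filter_cons_of_neg (by simp [hf])]
        exact ih s hnd.of_cons (fun k hk => hmem k (List.mem_cons_of_mem _ hk))
      · rw [if_pos hvh, PySem.Set.add_of_not_mem (fun hx => hq (hk0.mp hx))]
        rw [List.filter_cons_of_pos (by simp [hvh, hq])]
        rw [ih (s ++ [((k0 : Int), (j : Int))]) hnd.of_cons ?_]
        · simp
        · intro k hk
          have hne : k ≠ k0 := by
            rintro rfl; exact (List.nodup_cons.mp hnd).1 hk
          rw [List.mem_append, ← hmem k (List.mem_cons_of_mem _ hk)]
          simp [Prod.ext_iff, hne]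
    · rw [if_neg hvh, List.filter_cons_of_neg (by simp [hvh])]
      exact ih s hnd.of_cons (fun k hk => hmem k (List.mem_cons_of_mem _ hk))

theorem scanB_eq (matrix : List (List Int)) (R i j : Nat) (p : Int) (res : List (Int × Int))
    (hp : p = pvCM matrix i j) :
    pvScanB matrix R i j p res
      = res ++ ((pvKs R i).filter (fun k =>
          decide (pvM matrix k j ≤ pvM matrix i j) && !(decide (pvM matrix k j ≤ pvCM matrix i j)))).map
          (fun (k : Nat) => ((k : Int), (j : Int))) := by
  subst hp
  unfold pvScanB
  rw [foldl_append_ite (fun k => pvM matrix k j ≤ pvM matrix i j ∧ pvCM matrix i j < pvM matrix k j)]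
  have hfc : ∀ k ∈ pvKs R i,
      (decide (pvM matrix k j ≤ pvM matrix i j ∧ pvCM matrix i j < pvM matrix k j))
        = (decide (pvM matrix k j ≤ pvM matrix i j) && !(decide (pvM matrix k j ≤ pvCM matrix i j))) := by
    intro k _
    by_cases h1 : pvM matrix k j ≤ pvM matrix i j <;>
      by_cases h2 : pvCM matrix i j < pvM matrix k j <;>
        simp [h1, h2, not_lt.mp, not_le.mpr] <;> omega
  rw [List.filter_congr hfc]

theorem getD_take (l : List Int) (C j : Nat) (hj : j < C) :
    (l.take C).getD j 0 = l.getD j 0 := by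
  simp [List.getD_eq_getElem?_getD, hj]

theorem scan0_eq (matrix : List (List Int)) (R C j : Nat) (res : List (Int × Int)) (hj : j < C) :
    (pvKs R 0).foldl (fun res k =>
        if pvM matrix k j ≤ (pvPm0 matrix C).getD j 0 then res ++ [((k : Int), (j : Int))] else res) res
      = res ++ ((pvKs R 0).filter (fun k => decide (pvM matrix k j ≤ pvM matrix 0 j))).map
          (fun (k : Nat) => ((k : Int), (j : Int))) := by
  have hpm : (pvPm0 matrix C).getD j 0 = pvM matrix 0 j := by
    unfold pvPm0 pvM; exact getD_take _ _ _ hj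
  rw [hpm, foldl_append_ite (fun k => pvM matrix k j ≤ pvM matrix 0 j)]

theorem foldl_add_disjoint {α : Type} [BEq α] [LawfulBEq α] :
    ∀ (l acc : List α), l.Nodup → (∀ x ∈ l, x ∉ acc) →
    l.foldl PySem.Set.add acc = acc ++ l := by
  intro l
  induction l with
  | nil => intro acc _ _; simp
  | cons x l ih =>
    intro acc hnd hdis
    simp only [List.foldl_cons]
    rw [PySem.Set.add_of_not_mem (hdis x (List.mem_cons_self))]
    rw [ih (acc ++ [x]) hnd.of_cons ?_]
    · simp
    · intro y hy
      have : y ≠ x := by rintro rfl; exact (List.nodup_cons.mp hnd).1 hy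
      simp [List.mem_append, this]
      exact hdis y (List.mem_cons_of_mem _ hy)

theorem ofList_self {α : Type} [BEq α] [LawfulBEq α] (l : List α) (h : l.Nodup) :
    PySem.Set.ofList l = l := by
  rw [PySem.Set.ofList_eq_foldl]
  simpa using foldl_add_disjoint l [] h (by simp)

theorem getD_set_lt (pm : List Int) (c : Nat) (v : Int) (j : Nat) (hc : c < pm.length) :
    (pm.set c v).getD j 0 = if j = c then v else pm.getD j 0 := by
  by_cases h : j = c
  · subst h; simp [List.getD_eq_getElem?_getD, hc]
  · simp [List.getD_eq_getElem?_getD, h, Ne.symm h]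

theorem colStep (matrix : List (List Int)) (R C i c : Nat)
    (hi : 1 ≤ i) (_hiR : i < R) (hc : c < C)
    (s : List (Int × Int)) (pm : List Int)
    (hinv : pvInvC matrix R C i c s pm) :
    (pvColA matrix R i c s
        = (if pm.getD c 0 < pvM matrix i c then
             (pvScanB matrix R i c (pm.getD c 0) s, pm.set c (pvM matrix i c))
           else (s, pm)).1) ∧
    pvInvC matrix R C i (c + 1) (pvColA matrix R i c s)
      ((if pm.getD c 0 < pvM matrix i c then
          (pvScanB matrix R i c (pm.getD c 0) s, pm.set c (pvM matrix i c))
        else (s, pm)).2) := by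
  obtain ⟨hlen, hpm, hmem⟩ := hinv
  have hpc : pm.getD c 0 = pvCM matrix i c := by simpa using hpm c hc
  have hmemc : ∀ k ∈ pvKs R i, (((k : Int), (c : Int)) ∈ s ↔ pvM matrix k c ≤ pvCM matrix i c) := by
    intro k hk
    obtain ⟨hik, hkR⟩ := mem_pvKs.mp hk
    rw [hmem]
    constructor
    · rintro ⟨k', j', _, _, _, heq, t, ht, htk, hv⟩
      obtain ⟨hk', hj'⟩ : k' = k ∧ j' = c := by
        simpa [Prod.ext_iff, Nat.cast_inj] using heq.symm
      subst hk'
      rw [hj'] at ht hv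
      rw [if_neg (lt_irrefl _)] at ht
      exact (le_pvCM_iff matrix c _ i hi).mp ⟨t, ht, hv⟩
    · intro hv
      obtain ⟨t, ht, hvt⟩ := (le_pvCM_iff matrix c _ i hi).mpr hv
      exact ⟨k, c, hkR, hc, by omega, rfl, t, by rw [if_neg (lt_irrefl _)]; omega, by omega, hvt⟩
  have hA : pvColA matrix R i c s
      = s ++ ((pvKs R i).filter (fun k =>
          decide (pvM matrix k c ≤ pvM matrix i c) && !(decide (pvM matrix k c ≤ pvCM matrix i c)))).map
          (fun (k : Nat) => ((k : Int), (c : Int))) := by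
    exact scanA matrix c (pvM matrix i c) (fun k => pvM matrix k c ≤ pvCM matrix i c)
      (pvKs R i) s (nodup_pvKs R i) hmemc
  by_cases hbr : pm.getD c 0 < pvM matrix i c
  · have hcm : pvCM matrix i c < pvM matrix i c := by rwa [hpc] at hbr
    rw [if_pos hbr]
    have hB := scanB_eq matrix R i c (pm.getD c 0) s hpc
    refine ⟨by rw [hA, hB], ?_, ?_, ?_⟩
    · simpa using hlen
    · intro j hj
      rw [getD_set_lt pm c _ j (by omega)]
      by_cases hjc : j = c
      · rw [if_pos hjc, if_pos (by omega : j < c + 1), hjc, pvCM_succ,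
          max_eq_right (le_of_lt hcm)]
      · rw [if_neg hjc]
        have := hpm j hj
        by_cases hlt : j < c
        · rw [if_pos (by omega : j < c + 1)]; rwa [if_pos hlt] at this
        · rw [if_neg (by omega : ¬ j < c + 1)]; rwa [if_neg hlt] at this
    · intro x
      rw [hA, List.mem_append, hmem]
      constructor
      · rintro (⟨k, j, hkR, hjC, hk0, rfl, t, ht, htk, hv⟩ | hx)
        · refine ⟨k, j, hkR, hjC, hk0, rfl, t, ?_, htk, hv⟩
          by_cases hlt : j < c
          · rw [if_pos (by omega)]; rwa [if_pos hlt] at ht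
          · by_cases hjc : j < c + 1
            · rw [if_pos hjc]; rw [if_neg hlt] at ht; omega
            · rw [if_neg hjc]; rwa [if_neg hlt] at ht
        · simp only [List.mem_map, List.mem_filter] at hx
          obtain ⟨k, ⟨hk, hcond⟩, rfl⟩ := hx
          obtain ⟨hik, hkR⟩ := mem_pvKs.mp hk
          simp only [Bool.and_eq_true, Bool.not_eq_true', decide_eq_true_eq,
            decide_eq_false_iff_not] at hcond
          exact ⟨k, c, hkR, hc, by omega, rfl, i, by rw [if_pos (by omega)]; omega, hik, hcond.1⟩
      · rintro ⟨k, j, hkR, hjC, hk0, rfl, t, ht, htk, hv⟩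
        by_cases hjc : j = c
        · subst hjc
          rw [if_pos (by omega : j < j + 1)] at ht
          by_cases htl : t < i
          · exact Or.inl ⟨k, j, hkR, hc, hk0, rfl, t, by rw [if_neg (lt_irrefl _)]; omega, htk, hv⟩
          · rw [(by omega : t = i)] at hv htk
            by_cases hvc : pvM matrix k j ≤ pvCM matrix i j
            · obtain ⟨t', ht', hvt'⟩ := (le_pvCM_iff matrix j _ i hi).mpr hvc
              exact Or.inl ⟨k, j, hkR, hc, hk0, rfl, t',
                by rw [if_neg (lt_irrefl _)]; omega, by omega, hvt'⟩
            · refine Or.inr ?_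
              simp only [List.mem_map, List.mem_filter]
              exact ⟨k, ⟨mem_pvKs.mpr ⟨by omega, hkR⟩, by
                simp only [Bool.and_eq_true, Bool.not_eq_true', decide_eq_true_eq,
                  decide_eq_false_iff_not]
                exact ⟨hv, hvc⟩⟩, rfl⟩
        · refine Or.inl ⟨k, j, hkR, hjC, hk0, rfl, t, ?_, htk, hv⟩
          by_cases hlt : j < c
          · rw [if_pos hlt]; rw [if_pos (by omega)] at ht; exact ht
          · rw [if_neg hlt]; rw [if_neg (by omega : ¬ j < c + 1)] at ht; exact ht
  · have hcm : pvM matrix i c ≤ pvCM matrix i c := by rw [hpc] at hbr; omega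
    rw [if_neg hbr]
    have hX : ((pvKs R i).filter (fun k =>
        decide (pvM matrix k c ≤ pvM matrix i c) && !(decide (pvM matrix k c ≤ pvCM matrix i c)))) = [] := by
      rw [List.filter_eq_nil_iff]
      intro k _
      simp only [Bool.and_eq_true, Bool.not_eq_true', decide_eq_true_eq,
        decide_eq_false_iff_not, not_and]
      intro h1 h2; exact h2 (le_trans h1 hcm)
    have hA' : pvColA matrix R i c s = s := by rw [hA, hX]; simp
    refine ⟨hA', hlen, ?_, ?_⟩
    · intro j hj
      have := hpm j hj
      by_cases hjc : j = c
      · rw [if_pos (by omega : j < c + 1), hjc, pvCM_succ, max_eq_left hcm]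
        rw [if_neg (by omega : ¬ j < c)] at this
        rw [hjc] at this; exact this
      · by_cases hlt : j < c
        · rw [if_pos (by omega : j < c + 1)]; rwa [if_pos hlt] at this
        · rw [if_neg (by omega : ¬ j < c + 1)]; rwa [if_neg hlt] at this
    · intro x
      rw [hA', hmem]
      constructor
      · rintro ⟨k, j, hkR, hjC, hk0, rfl, t, ht, htk, hv⟩
        refine ⟨k, j, hkR, hjC, hk0, rfl, t, ?_, htk, hv⟩
        by_cases hlt : j < c
        · rw [if_pos (by omega)]; rw [if_pos hlt] at ht; omega
        · by_cases hjc : j < c + 1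
          · rw [if_pos hjc]; rw [if_neg hlt] at ht; omega
          · rw [if_neg hjc]; rwa [if_neg hlt] at ht
      · rintro ⟨k, j, hkR, hjC, hk0, rfl, t, ht, htk, hv⟩
        by_cases hjc : j = c
        · subst hjc
          rw [if_pos (by omega : j < j + 1)] at ht
          by_cases htl : t < i
          · exact ⟨k, j, hkR, hc, hk0, rfl, t, by rw [if_neg (lt_irrefl _)]; omega, htk, hv⟩
          · rw [(by omega : t = i)] at hv htk
            obtain ⟨t', ht', hvt'⟩ := (le_pvCM_iff matrix j _ i hi).mpr (le_trans hv hcm)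
            exact ⟨k, j, hkR, hc, hk0, rfl, t',
              by rw [if_neg (lt_irrefl _)]; omega, by omega, hvt'⟩
        · refine ⟨k, j, hkR, hjC, hk0, rfl, t, ?_, htk, hv⟩
          by_cases hlt : j < c
          · rw [if_pos hlt]; rw [if_pos (by omega)] at ht; exact ht
          · rw [if_neg hlt]; rw [if_neg (by omega : ¬ j < c + 1)] at ht; exact ht

theorem pyRange_one_nat (b : Nat) :
    PySem.List.pyRange 1 (b : Int) = (List.range (b - 1)).map (fun (t : Nat) => ((1 + t : Nat) : Int)) := by
  rw [PySem.List.pyRange_one]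
  rw [show ((b : Int) - 1).toNat = b - 1 by omega]
  exact List.map_congr_left (fun t _ => by push_cast; ring)

theorem pyRange_succ_nat (i b : Nat) :
    PySem.List.pyRange ((i : Int) + 1) (b : Int)
      = (List.range (b - (i + 1))).map (fun (t : Nat) => ((i + 1 + t : Nat) : Int)) := by
  rw [PySem.List.pyRange_one]
  rw [show ((b : Int) - ((i : Int) + 1)).toNat = b - (i + 1) by omega]
  exact List.map_congr_left (fun t _ => by push_cast; ring)

theorem bridgeA (matrix : List (List Int)) : find_obstructed_seats matrix = pvA matrix := by
  unfold find_obstructed_seats pvA pvRowA pvColA pvKs pvM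
  simp only [PySem.List.pyRange_zero_nat, pyRange_succ_nat, List.foldl_map,
    PySem.List.pyGetD_natCast, PySem.List.pyGetD_zero, PySem.Set.empty]

theorem bridgeB (matrix : List (List Int)) :
    find_obstructed_seats_alt matrix = PySem.Set.ofList (pvB matrix).1 := by
  unfold find_obstructed_seats_alt pvB pvRes0 pvRowB pvScanB pvPm0 pvKs pvM
  simp only [PySem.List.pyRange_zero_nat, pyRange_one_nat, pyRange_succ_nat, List.foldl_map,
    PySem.List.pyGetD_natCast, PySem.List.pyGetD_zero, PySem.List.slice_to_natCast,
    PySem.List.pySetD_natCast, Nat.zero_add, Nat.add_comm 1]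

-- ===== row step =====
theorem rowStep (matrix : List (List Int)) (R C i : Nat)
    (hi : 1 ≤ i) (hiR : i < R)
    (s : List (Int × Int)) (pm : List Int)
    (hinv : pvInvC matrix R C i 0 s pm) :
    pvRowA matrix R C i s = (pvRowB matrix R C i (s, pm)).1 ∧
    pvInvC matrix R C (i + 1) 0 (pvRowA matrix R C i s) (pvRowB matrix R C i (s, pm)).2 := by
  have aux : ∀ n, n ≤ C →
      ∃ pm', (List.range n).foldl (fun st j =>
          if st.2.getD j 0 < pvM matrix i j then
            (pvScanB matrix R i j (st.2.getD j 0) st.1, st.2.set j (pvM matrix i j))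
          else st) (s, pm)
        = ((List.range n).foldl (fun s j => pvColA matrix R i j s) s, pm') ∧
        pvInvC matrix R C i n ((List.range n).foldl (fun s j => pvColA matrix R i j s) s) pm' := by
    intro n
    induction n with
    | zero => intro _; exact ⟨pm, by simp, hinv⟩
    | succ n ih =>
      intro hn
      obtain ⟨pm', heq, hinv'⟩ := ih (by omega)
      obtain ⟨h1, h2⟩ := colStep matrix R C i n hi hiR (by omega) _ pm' hinv'
      refine ⟨((if pm'.getD n 0 < pvM matrix i n then
          (pvScanB matrix R i n (pm'.getD n 0) ((List.range n).foldl (fun s j => pvColA matrix R i j s) s), pm'.set n (pvM matrix i n))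
        else ((List.range n).foldl (fun s j => pvColA matrix R i j s) s, pm'))).2, ?_, ?_⟩
      · rw [List.range_succ, List.foldl_append, List.foldl_append, heq]
        simp [h1]
      · rw [List.range_succ, List.foldl_append]
        simpa using h2
  obtain ⟨pm', heq, hinv'⟩ := aux C (le_refl C)
  obtain ⟨hlen, hpm, hmem⟩ := hinv'
  have h1 : pvRowA matrix R C i s = (pvRowB matrix R C i (s, pm)).1 := by
    unfold pvRowA pvRowB; rw [heq]
  refine ⟨h1, ?_, ?_, ?_⟩
  · unfold pvRowB; rw [heq]; exact hlen
  · unfold pvRowB; rw [heq]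
    intro j hj
    have := hpm j hj
    rw [if_pos hj] at this
    rw [if_neg (by omega : ¬ j < 0)]
    exact this
  · intro x
    unfold pvRowA
    rw [hmem]
    unfold pvMem
    constructor
    · rintro ⟨k, j, hkR, hjC, hk0, rfl, t, ht, htk, hv⟩
      rw [if_pos hjC] at ht
      exact ⟨k, j, hkR, hjC, hk0, rfl, t, by rw [if_neg (by omega : ¬ j < 0)]; omega, htk, hv⟩
    · rintro ⟨k, j, hkR, hjC, hk0, rfl, t, ht, htk, hv⟩
      rw [if_neg (by omega : ¬ j < 0)] at ht
      exact ⟨k, j, hkR, hjC, hk0, rfl, t, by rw [if_pos hjC]; omega, htk, hv⟩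

-- ===== row 0 =====
theorem row0 (matrix : List (List Int)) (R C : Nat) :
    pvRowA matrix R C 0 [] = pvRes0 matrix R C ∧
    (∀ x, x ∈ pvRowA matrix R C 0 [] ↔ pvMem0 matrix R C x) := by
  have aux : ∀ n, n ≤ C →
      (List.range n).foldl (fun s j => pvColA matrix R 0 j s) ([] : List (Int × Int))
        = (List.range n).foldl (fun res j =>
            (pvKs R 0).foldl (fun res k =>
              if pvM matrix k j ≤ (pvPm0 matrix C).getD j 0 then res ++ [((k : Int), (j : Int))] else res) res) [] ∧
      (∀ x, x ∈ (List.range n).foldl (fun s j => pvColA matrix R 0 j s) ([] : List (Int × Int)) ↔ pvMem0 matrix R n x) := by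
    intro n
    induction n with
    | zero =>
      intro _
      refine ⟨rfl, fun x => ?_⟩
      simp [pvMem0]
    | succ n ih =>
      intro hn
      obtain ⟨heq, hmem⟩ := ih (by omega)
      have hmemc : ∀ k ∈ pvKs R 0,
          (((k : Int), (n : Int)) ∈ (List.range n).foldl (fun s j => pvColA matrix R 0 j s) ([] : List (Int × Int))
            ↔ (fun (_ : Nat) => False) k) := by
        intro k hk
        simp only [iff_false]
        intro hx
        obtain ⟨k', j', _, hj', _, heqx, _⟩ := (hmem _).mp hx
        obtain ⟨hkk, hjj⟩ : k' = k ∧ j' = n := by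
          simpa [Prod.ext_iff, Nat.cast_inj] using heqx.symm
        omega
      have hstep := scanA matrix n (pvM matrix 0 n) (fun _ => False) (pvKs R 0)
        ((List.range n).foldl (fun s j => pvColA matrix R 0 j s) ([] : List (Int × Int)))
        (nodup_pvKs R 0) hmemc
      have hstep2 : pvColA matrix R 0 n
          ((List.range n).foldl (fun s j => pvColA matrix R 0 j s) ([] : List (Int × Int)))
          = ((List.range n).foldl (fun s j => pvColA matrix R 0 j s) ([] : List (Int × Int)))
            ++ ((pvKs R 0).filter (fun k =>
              decide (pvM matrix k n ≤ pvM matrix 0 n) && !(decide ((fun (_ : Nat) => False) k)))).map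
              (fun (k : Nat) => ((k : Int), (n : Int))) := hstep
      have hfil : ((pvKs R 0).filter (fun k =>
            decide (pvM matrix k n ≤ pvM matrix 0 n) && !(decide ((fun (_ : Nat) => False) k))))
          = (pvKs R 0).filter (fun k => decide (pvM matrix k n ≤ pvM matrix 0 n)) := by
        apply List.filter_congr; intro k _; simp
      rw [hfil] at hstep2
      constructor
      · rw [List.range_succ, List.foldl_append, List.foldl_append, ← heq]
        simp only [List.foldl_cons, List.foldl_nil]
        rw [hstep2, scan0_eq matrix R C n _ (by omega)]
      · intro x
        rw [List.range_succ, List.foldl_append]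
        simp only [List.foldl_cons, List.foldl_nil]
        rw [hstep2]
        constructor
        · intro hx
          rcases List.mem_append.mp hx with hx | hx
          · obtain ⟨k, j, hkR, hj, hk0, rfl, hv⟩ := (hmem x).mp hx
            exact ⟨k, j, hkR, by omega, hk0, rfl, hv⟩
          · simp only [List.mem_map, List.mem_filter, decide_eq_true_eq] at hx
            obtain ⟨k, ⟨hk, hcond⟩, rfl⟩ := hx
            obtain ⟨h0k, hkR⟩ := mem_pvKs.mp hk
            exact ⟨k, n, hkR, by omega, by omega, rfl, hcond⟩
        · rintro ⟨k, j, hkR, hj, hk0, rfl, hv⟩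
          by_cases hjn : j = n
          · subst hjn
            refine List.mem_append.mpr (Or.inr ?_)
            simp only [List.mem_map, List.mem_filter, decide_eq_true_eq]
            exact ⟨k, ⟨mem_pvKs.mpr ⟨by omega, hkR⟩, hv⟩, rfl⟩
          · exact List.mem_append.mpr (Or.inl ((hmem _).mpr ⟨k, j, hkR, by omega, hk0, rfl, hv⟩))
  exact (aux C (le_refl C))

-- ===== nodup =====
theorem nodup_add {α : Type} [BEq α] [LawfulBEq α] (s : PySem.Set α) (x : α) (h : s.Nodup) :
    (PySem.Set.add s x).Nodup := by
  by_cases hx : x ∈ s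
  · rwa [PySem.Set.add_of_mem hx]
  · rw [PySem.Set.add_of_not_mem hx]
    simp [List.nodup_append, h]
    exact fun a ha hax => hx (hax ▸ ha)

theorem foldl_preserve {α β : Type} (P : α → Prop) (step : α → β → α)
    (hstep : ∀ s b, P s → P (step s b)) :
    ∀ (l : List β) (s : α), P s → P (l.foldl step s) := by
  intro l
  induction l with
  | nil => intro s h; exact h
  | cons b l ih => intro s h; exact ih _ (hstep s b h)

theorem nodup_pvA (matrix : List (List Int)) : (pvA matrix).Nodup := by
  unfold pvA
  refine foldl_preserve (fun s : List (Int × Int) => s.Nodup) _ (fun s i hs => ?_) _ _ (by simp)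
  unfold pvRowA
  refine foldl_preserve (fun s : List (Int × Int) => s.Nodup) _ (fun s j hs' => ?_) _ _ hs
  unfold pvColA
  refine foldl_preserve (fun s : List (Int × Int) => s.Nodup) _ (fun s k hs'' => ?_) _ _ hs'
  by_cases h : pvM matrix k j ≤ pvM matrix i j
  · rw [if_pos h]; exact nodup_add _ _ hs''
  · rwa [if_neg h]

-- ===== main =====
theorem main_eq (matrix : List (List Int)) (hpre : Pre_find_obstructed_seats matrix) :
    pvA matrix = (pvB matrix).1 ∧ (pvA matrix).Nodup := by
  obtain ⟨hne, hrows⟩ := hpre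
  refine ⟨?_, nodup_pvA matrix⟩
  have hR1 : 1 ≤ matrix.length := List.length_pos_iff.mpr hne
  set R := matrix.length with hR
  set C := (matrix.getD 0 []).length with hC
  -- peel off row 0
  have hsplit : List.range R = 0 :: (List.range (R - 1)).map (fun t => t + 1) := by
    rw [(by omega : R = (R - 1) + 1), List.range_succ_eq_map]
    simp
  obtain ⟨h0eq, h0mem⟩ := row0 matrix R C
  have hpm0len : (pvPm0 matrix C).length = C := by
    simp [pvPm0, hC]
  have hpm0get : ∀ j, j < C → (pvPm0 matrix C).getD j 0 = pvCM matrix 1 j := by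
    intro j hj
    rw [pvCM_one]
    exact getD_take _ _ _ hj
  have hinv1 : pvInvC matrix R C 1 0 (pvRowA matrix R C 0 []) (pvPm0 matrix C) := by
    refine ⟨hpm0len, ?_, ?_⟩
    · intro j hj
      rw [if_neg (by omega : ¬ j < 0)]
      exact hpm0get j hj
    · intro x
      rw [h0mem x]
      unfold pvMem0 pvMem
      constructor
      · rintro ⟨k, j, hkR, hj, hk0, rfl, hv⟩
        exact ⟨k, j, hkR, hj, hk0, rfl, 0, by rw [if_neg (by omega : ¬ j < 0)]; omega, by omega, hv⟩
      · rintro ⟨k, j, hkR, hj, hk0, rfl, t, ht, htk, hv⟩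
        rw [if_neg (by omega : ¬ j < 0)] at ht
        have : t = 0 := by omega
        subst this
        exact ⟨k, j, hkR, hj, hk0, rfl, hv⟩
  -- rows 1 .. R-1
  have aux : ∀ n, n ≤ R - 1 →
      ∃ pm', (List.range n).foldl (fun st t => pvRowB matrix R C (t + 1) st)
          (pvRes0 matrix R C, pvPm0 matrix C)
        = ((List.range n).foldl (fun s t => pvRowA matrix R C (t + 1) s) (pvRowA matrix R C 0 []), pm') ∧
        pvInvC matrix R C (n + 1) 0
          ((List.range n).foldl (fun s t => pvRowA matrix R C (t + 1) s) (pvRowA matrix R C 0 [])) pm' := by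
    intro n
    induction n with
    | zero =>
      intro _
      exact ⟨pvPm0 matrix C, by simp [h0eq], hinv1⟩
    | succ n ih =>
      intro hn
      obtain ⟨pm', heq, hinv'⟩ := ih (by omega)
      obtain ⟨h1, h2⟩ := rowStep matrix R C (n + 1) (by omega) (by omega) _ pm' hinv'
      refine ⟨(pvRowB matrix R C (n + 1)
          ((List.range n).foldl (fun s t => pvRowA matrix R C (t + 1) s) (pvRowA matrix R C 0 []), pm')).2, ?_, ?_⟩
      · rw [List.range_succ, List.foldl_append, List.foldl_append, heq]
        simp only [List.foldl_cons, List.foldl_nil]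
        rw [h1]
      · rw [List.range_succ, List.foldl_append]
        simp only [List.foldl_cons, List.foldl_nil]
        exact h2
  obtain ⟨pm', heq, _⟩ := aux (R - 1) (le_refl _)
  have : pvA matrix = (List.range (R - 1)).foldl (fun s t => pvRowA matrix R C (t + 1) s) (pvRowA matrix R C 0 []) := by
    unfold pvA
    rw [← hR, ← hC, hsplit]
    simp only [List.foldl_cons, List.foldl_map]
  rw [this]
  unfold pvB
  rw [← hR, ← hC, heq]

-- ===== VERDICT (by name: the statement is the Claim_ definition above) =====
theorem find_obstructed_seats_spec : Claim_equal_find_obstructed_seats := by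
  intro matrix _ hpre
  unfold Spec_find_obstructed_seats
  obtain ⟨heq, hnd⟩ := main_eq matrix hpre
  rw [bridgeA, bridgeB, ← heq, ofList_self _ hnd]
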